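-- pv_equiv track=rewrite | github.com/WachirananNot/229223-Programming-For-Data-Science | Lab6/Lab06_2_630510642.py | create_new_string
-- ===== SOURCE A (Python) =====
-- def create_new_string(n,str_):
--     len_old_str = (len(str_))
--     count_g = str_.count(',')+1
--     if(count_g<n):
--         temp_str = "meaw meaw cat song".upper()
--         m = 0
--         for k in range(count_g,n):
--             new_str = temp_str[m:m+2]
--             str_ = str_ +","+new_str
--             m += 2
--     elif(count_g>n):
--         for i in range(count_g-n):
--             j = str_.find(',')
--             str_ = str_.replace(str_[j],'',1)
--         str_ = str_.upper()
--     else: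
--         str_ = str_[::-1].lower()
--     len_new_str = len(str_)
--     return len_old_str,str_,len_new_str
-- ===== SOURCE B (Python) =====
-- def create_new_string(n, str_):
--     len_old = len(str_)
--     g = str_.count(',') + 1
--     if g < n:
--         TEMP = "MEAW MEAW CAT SONG"
--         s = str_ + "".join("," + TEMP[2 * i:2 * i + 2] for i in range(n - g))
--     elif g > n:
--         k = g - n
--         out = []
--         for ch in str_:
--             if ch == ',' and k > 0:
--                 k -= 1
--             else:
--                 out.append(ch)
--         s = "".join(out).upper()
--     else:
--         s = "".join(reversed(str_)).lower()
--     return len_old, s, len(s)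
-- ===== Notes on version B (the rewrite author's own statement) =====
-- stated objective: faster
-- what changed: B replaces A's repeated str.find(',')+str.replace(...,1) rescans (one full scan per removed comma) with a single left-to-right pass that drops the first count_g-n commas, and builds the padding suffix directly from the fixed 2-char chunks instead of A's running (string,m) state.
-- intended difference: On n <= 0 (when A still returns, i.e. the string has at least 1-n non-comma characters) A's loop runs out of commas and, because find(',') returns -1, keeps deleting the first occurrence of the current last character; B removes all commas and uppercases, the intended reading of 'remove count_g-n commas'. — e.g. on create_new_string(0, "a,b"): A returns (3, "A", 1), B returns (3, "AB", 2)
import Mathlib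
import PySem

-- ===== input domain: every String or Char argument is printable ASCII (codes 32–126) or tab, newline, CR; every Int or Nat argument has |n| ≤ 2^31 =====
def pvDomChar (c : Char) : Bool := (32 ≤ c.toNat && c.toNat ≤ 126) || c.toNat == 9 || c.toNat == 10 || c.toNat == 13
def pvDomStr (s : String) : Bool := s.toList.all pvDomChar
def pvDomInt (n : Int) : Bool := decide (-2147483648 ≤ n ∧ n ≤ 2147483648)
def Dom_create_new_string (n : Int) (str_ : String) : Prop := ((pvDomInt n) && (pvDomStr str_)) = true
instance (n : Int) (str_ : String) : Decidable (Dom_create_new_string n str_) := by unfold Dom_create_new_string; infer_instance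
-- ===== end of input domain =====

-- B removes the first (count_g-n) commas in one left-to-right pass instead of A's repeated find+replace rescans; on n ≤ 0 (see D_) B removes all commas where A goes on deleting occurrences of the last character.


-- ===== PORT A =====
-- "meaw meaw cat song".upper()
def pvTempA : List Char := PySem.Chars.upper ("meaw meaw cat song".toList)

-- hand port of str_.replace(str_[j], '', 1): the pattern str_[j] is a single character and the
-- replacement is '' with count 1, so it deletes the first occurrence of that character (exact there)
def pvRemoveFirst : List Char → Char → List Char
  | [], _ => []
  | c :: t, x => if c = x then t else c :: pvRemoveFirst t x

-- one iteration of A's elif-loop body: j = str_.find(','); str_ = str_.replace(str_[j], '', 1)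
-- (PySem.List.pyGet? = none is Python's IndexError on str_[j]; excluded by Pre_, the state is returned unchanged)
def pvRemoveStep (s : List Char) : List Char :=
  match PySem.List.pyGet? s (PySem.Chars.find s [',']) with
  | some c => pvRemoveFirst s c
  | none => s

def create_new_string (n : Int) (str_ : String) : Int × String × Int :=
  let cs := str_.toList
  let len_old_str : Int := PySem.Chars.len cs
  let count_g : Int := (PySem.Chars.count cs [','] : Int) + 1
  let res : List Char :=
    if count_g < n then
      ((PySem.List.pyRange count_g n 1).foldl
        (fun (st : List Char × Int) _ =>
          (st.1 ++ [','] ++ PySem.List.slice pvTempA (some st.2) (some (st.2 + 2)), st.2 + 2)) (cs, 0)).1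
    else if count_g > n then
      PySem.Chars.upper ((PySem.List.pyRange 0 (count_g - n) 1).foldl (fun s _ => pvRemoveStep s) cs)
    else
      PySem.Chars.lower ((PySem.List.slice? cs none none (-1)).getD [])
  (len_old_str, String.ofList res, PySem.Chars.len res)

-- ===== PORT B =====
def pvTempB : List Char := "MEAW MEAW CAT SONG".toList

-- B's single pass: copy the characters, dropping a comma while the budget k is positive
def pvSkip (k : Int) (cs : List Char) : List Char :=
  (cs.foldl (fun (st : Int × List Char) ch =>
      if ch = ',' ∧ 0 < st.1 then (st.1 - 1, st.2) else (st.1, st.2 ++ [ch])) (k, ([] : List Char))).2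

def create_new_string_alt (n : Int) (str_ : String) : Int × String × Int :=
  let cs := str_.toList
  let len_old : Int := PySem.Chars.len cs
  let g : Int := (PySem.Chars.count cs [','] : Int) + 1
  let s : List Char :=
    if g < n then
      cs ++ (PySem.List.pyRange 0 (n - g) 1).foldl
        (fun acc i => acc ++ [','] ++ PySem.List.slice pvTempB (some (2 * i)) (some (2 * i + 2))) []
    else if g > n then
      PySem.Chars.upper (pvSkip (g - n) cs)
    else
      PySem.Chars.lower cs.reverse
  (len_old, String.ofList s, PySem.Chars.len s)

-- ===== PRECONDITION & SPEC =====
-- Pre_ excludes exactly the inputs where A raises IndexError: with n ≤ 0 A's removal loop runs out of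
-- commas, str_.find(',') returns -1 and str_[-1] is read; once the string is empty that read raises.
def Pre_create_new_string (n : Int) (str_ : String) : Prop :=
  1 ≤ n ∨ 1 - n ≤ (str_.toList.length : Int) - (PySem.Chars.count str_.toList [','] : Int)
instance (n : Int) (str_ : String) : Decidable (Pre_create_new_string n str_) := by unfold Pre_create_new_string; infer_instance

def pvWitness_create_new_string : Int × String := (1, "a,b")

-- On n ≤ 0 (A returns there when the string has at least 1-n non-comma characters) A's loop, after the
-- commas are gone, keeps deleting the first occurrence of the current LAST character — an accident of
-- find returning -1; B removes all commas and uppercases, the natural reading of "remove count_g-n commas".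
def D_create_new_string (n : Int) (str_ : String) : Prop := n ≤ 0
instance (n : Int) (str_ : String) : Decidable (D_create_new_string n str_) := by unfold D_create_new_string; infer_instance

def Spec_create_new_string (n : Int) (str_ : String) (out : Int × String × Int) : Prop :=
  ¬ D_create_new_string n str_ → out = create_new_string_alt n str_
instance (n : Int) (str_ : String) (out : Int × String × Int) : Decidable (Spec_create_new_string n str_ out) := by unfold Spec_create_new_string; infer_instance

def pvDiffWitness_create_new_string : Int × String := (0, "a,b")
def pvDiffWitnessOut_create_new_string : (Int × String × Int) × (Int × String × Int) := ((3, "A", 1), (3, "AB", 2))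

-- ===== CLAIM (what is proved, stated in full; the proofs are below) =====
def Claim_unchanged_create_new_string : Prop := ∀ (n : Int) (str_ : String), Dom_create_new_string n str_ → Pre_create_new_string n str_ → Spec_create_new_string n str_ (create_new_string n str_)
def Claim_changed_create_new_string : Prop := Dom_create_new_string (pvDiffWitness_create_new_string.1) (pvDiffWitness_create_new_string.2) ∧ Pre_create_new_string (pvDiffWitness_create_new_string.1) (pvDiffWitness_create_new_string.2) ∧ D_create_new_string (pvDiffWitness_create_new_string.1) (pvDiffWitness_create_new_string.2) ∧ create_new_string (pvDiffWitness_create_new_string.1) (pvDiffWitness_create_new_string.2) = pvDiffWitnessOut_create_new_string.1 ∧ create_new_string_alt (pvDiffWitness_create_new_string.1) (pvDiffWitness_create_new_string.2) = pvDiffWitnessOut_create_new_string.2 ∧ pvDiffWitnessOut_create_new_string.1 ≠ pvDiffWitnessOut_create_new_string.2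
def Claim_exact_create_new_string : Prop := ∀ (n : Int) (str_ : String), Dom_create_new_string n str_ → Pre_create_new_string n str_ → D_create_new_string n str_ → create_new_string n str_ ≠ create_new_string_alt n str_

-- ===== LEMMAS AND PROOFS =====

-- PySem.Chars.count with a one-character pattern is List.count
theorem pvCountGo (fuel : Nat) : ∀ (l : List Char) (acc : Nat), l.length ≤ fuel →
    PySem.Chars.count.go [','] fuel l acc = acc + l.count ',' := by
  induction fuel with
  | zero =>
    intro l acc h
    unfold PySem.Chars.count.go
    cases l with
    | nil => simp
    | cons c t => simp at h
  | succ f ih =>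
    intro l acc h
    unfold PySem.Chars.count.go
    cases l with
    | nil => simp
    | cons c t =>
      by_cases hc : c = ','
      · subst hc
        simp [List.isPrefixOf, ih t (acc + 1) (by simpa using h)]
        omega
      · simp [List.isPrefixOf, hc, ih t acc (by simpa using h)]
        intro h'
        exact absurd h'.symm hc

theorem pvCount (l : List Char) : PySem.Chars.count l [','] = l.count ',' := by
  simp [PySem.Chars.count, pvCountGo l.length l 0 le_rfl]

-- structural version of B's skip pass
def pvSkipL : Nat → List Char → List Char
  | _, [] => []
  | k, c :: t => if c = ',' ∧ 0 < k then pvSkipL (k - 1) t else c :: pvSkipL k t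

theorem pvSkip_eq_skipL (cs : List Char) : ∀ (k : Int) (acc : List Char),
    (cs.foldl (fun (st : Int × List Char) ch =>
      if ch = ',' ∧ 0 < st.1 then (st.1 - 1, st.2) else (st.1, st.2 ++ [ch])) (k, acc)).2
      = acc ++ pvSkipL k.toNat cs := by
  induction cs with
  | nil => intro k acc; simp [pvSkipL]
  | cons c t ih =>
    intro k acc
    simp only [List.foldl_cons]
    by_cases hcc : c = ','
    · subst hcc
      by_cases hk : (0 : Int) < k
      · have h1 : (0 : Nat) < k.toNat := by omega
        have h2 : (k - 1).toNat = k.toNat - 1 := by omega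
        simp [hk, pvSkipL, h1, ih, h2]
      · have h1 : ¬ (0 : Nat) < k.toNat := by omega
        simp [hk, pvSkipL, h1, ih]
    · simp [hcc, pvSkipL, ih]

theorem pvSkipL_zero (cs : List Char) : pvSkipL 0 cs = cs := by
  induction cs with
  | nil => rfl
  | cons c t ih => simp [pvSkipL, ih]

theorem pvSkipL_succ (k : Nat) : ∀ (cs : List Char), ',' ∈ cs →
    pvSkipL (k + 1) cs = pvSkipL k (pvRemoveFirst cs ',') := by
  intro cs
  induction cs with
  | nil => intro h; simp at h
  | cons c t ih =>
    intro h
    by_cases hc : c = ','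
    · subst hc; simp [pvSkipL, pvRemoveFirst]
    · have ht : ',' ∈ t := by
        rcases List.mem_cons.mp h with h' | h'
        · exact absurd h'.symm hc
        · exact h'
      simp [pvSkipL, hc, pvRemoveFirst, ih ht]

theorem pvCount_removeFirst (cs : List Char) (x : Char) (h : x ∈ cs) :
    (pvRemoveFirst cs x).count x + 1 = cs.count x := by
  induction cs with
  | nil => simp at h
  | cons c t ih =>
    by_cases hc : c = x
    · subst hc; simp [pvRemoveFirst]
    · have ht : x ∈ t := by
        rcases List.mem_cons.mp h with h' | h'
        · exact absurd h'.symm hc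
        · exact h'
      simp [pvRemoveFirst, hc, ih ht]

theorem pvLen_removeFirst (cs : List Char) (x : Char) (h : x ∈ cs) :
    (pvRemoveFirst cs x).length + 1 = cs.length := by
  induction cs with
  | nil => simp at h
  | cons c t ih =>
    by_cases hc : c = x
    · subst hc; simp [pvRemoveFirst]
    · have ht : x ∈ t := by
        rcases List.mem_cons.mp h with h' | h'
        · exact absurd h'.symm hc
        · exact h'
      simp [pvRemoveFirst, hc, ih ht]

theorem pvMem_infix (cs : List Char) (x : Char) (h : x ∈ cs) : [x] <:+: cs := by
  rcases List.append_of_mem h with ⟨s, t, rfl⟩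
  exact ⟨s, t, by simp⟩

-- when a comma is present, one iteration of A's loop deletes the first comma
theorem pvRemoveStep_comma (cs : List Char) (h : ',' ∈ cs) :
    pvRemoveStep cs = pvRemoveFirst cs ',' := by
  have hinf : [','] <:+: cs := pvMem_infix cs ',' h
  have hge : 0 ≤ PySem.Chars.find cs [','] := by
    have hiff := PySem.Chars.find_eq_neg_one_iff cs [',']
    have hne : PySem.Chars.find cs [','] ≠ -1 := fun he => (hiff.mp he) hinf
    have := PySem.Chars.neg_one_le_find cs [',']
    omega
  obtain ⟨hpre, -⟩ := PySem.Chars.find_spec hge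
  rcases hpre with ⟨t, ht⟩
  have hlt : (PySem.Chars.find cs [',']).toNat < cs.length := by
    by_contra hge2
    have hnil : cs.drop (PySem.Chars.find cs [',']).toNat = [] := List.drop_eq_nil_of_le (by omega)
    rw [hnil] at ht; simp at ht
  have hget : PySem.List.pyGet? cs (PySem.Chars.find cs [','])
      = some cs[(PySem.Chars.find cs [',']).toNat] :=
    PySem.List.pyGet?_eq_some_getElem cs hge (by omega)
  have h0 : (cs.drop (PySem.Chars.find cs [',']).toNat)[0]? = some ',' := by rw [← ht]; rfl
  have h1 : cs[(PySem.Chars.find cs [',']).toNat + 0]? = some ',' := by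
    rw [← List.getElem?_drop]; exact h0
  simp only [Nat.add_zero] at h1
  have hcomma : cs[(PySem.Chars.find cs [',']).toNat]'hlt = ',' := by
    rw [List.getElem?_eq_getElem hlt] at h1
    exact Option.some.inj h1
  rw [pvRemoveStep, hget]
  exact congrArg (pvRemoveFirst cs) hcomma

-- A's removal loop over k ≤ (number of commas) iterations is B's skip pass
theorem pvIterate_eq_skipL : ∀ (k : Nat) (cs : List Char), k ≤ cs.count ',' →
    pvRemoveStep^[k] cs = pvSkipL k cs := by
  intro k
  induction k with
  | zero => intro cs _; simp [pvSkipL_zero]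
  | succ j ih =>
    intro cs hk
    have hmem : ',' ∈ cs := by
      by_contra hnm
      simp [List.count_eq_zero_of_not_mem hnm] at hk
    rw [Function.iterate_succ_apply, pvRemoveStep_comma cs hmem, pvSkipL_succ j cs hmem]
    apply ih
    have := pvCount_removeFirst cs ',' hmem
    omega

theorem pvFoldl_ignore_iterate {α β : Type} (f : α → α) : ∀ (l : List β) (s : α),
    l.foldl (fun s _ => f s) s = f^[l.length] s := by
  intro l
  induction l with
  | nil => intro s; simp
  | cons x t ih => intro s; simp [List.foldl_cons, ih, Function.iterate_succ_apply]

theorem pvRange_single (a : Int) : PySem.List.pyRange a (a + 1) 1 = [a] := by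
  rw [PySem.List.pyRange_of_pos _ _ (by norm_num : (0:Int) < 1)]
  simp

theorem pvRange_len (m : Int) : (PySem.List.pyRange 0 m 1).length = m.toNat := by
  rw [PySem.List.pyRange_of_pos _ _ (by norm_num : (0:Int) < 1)]
  split_ifs with h
  all_goals simp
  all_goals omega

theorem pvTemp_eq : pvTempA = pvTempB := by decide

-- the append branch: A's running (string, m) fold equals str_ ++ B's suffix fold
theorem pvAppend_loop (L : Nat) (a : Int) (p : List Char) :
    (PySem.List.pyRange a (a + L) 1).foldl
        (fun (st : List Char × Int) _ =>
          (st.1 ++ [','] ++ PySem.List.slice pvTempA (some st.2) (some (st.2 + 2)), st.2 + 2)) (p, 0)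
      = (p ++ (PySem.List.pyRange 0 (L : Int) 1).foldl
          (fun acc i => acc ++ [','] ++ PySem.List.slice pvTempB (some (2 * i)) (some (2 * i + 2))) [],
         2 * (L : Int)) := by
  induction L with
  | zero => simp
  | succ m ih =>
    have h1 : PySem.List.pyRange a (a + ((m : Int) + 1)) 1
        = PySem.List.pyRange a (a + m) 1 ++ [a + m] := by
      rw [PySem.List.pyRange_one_append a (a + m) (a + ((m : Int) + 1)) (by omega) (by omega)]
      rw [show a + ((m : Int) + 1) = (a + m) + 1 by ring, pvRange_single]
    have h2 : PySem.List.pyRange 0 ((m : Int) + 1) 1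
        = PySem.List.pyRange 0 (m : Int) 1 ++ [(m : Int)] := by
      rw [PySem.List.pyRange_one_append 0 (m : Int) ((m : Int) + 1) (by omega) (by omega)]
      rw [pvRange_single]
    push_cast
    rw [h1, h2, List.foldl_append, List.foldl_append]
    push_cast at ih
    rw [ih]
    simp only [List.foldl_cons, List.foldl_nil, pvTemp_eq, List.append_assoc, Prod.mk.injEq]
    exact ⟨trivial, by ring⟩

-- length facts for the exact-difference theorem
theorem pvLen_removeStep (cs : List Char) (h : cs ≠ []) :
    (pvRemoveStep cs).length + 1 = cs.length := by
  by_cases hm : ',' ∈ cs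
  · rw [pvRemoveStep_comma cs hm]; exact pvLen_removeFirst cs ',' hm
  · have hni : ¬ [','] <:+: cs := by
      intro hinf
      rcases hinf with ⟨s, t, rfl⟩
      exact hm (by simp)
    have hfind : PySem.Chars.find cs [','] = -1 :=
      (PySem.Chars.find_eq_neg_one_iff cs [',']).mpr hni
    cases hx : cs.getLast? with
    | none => exact absurd (List.getLast?_eq_none_iff.mp hx) h
    | some x =>
      rw [pvRemoveStep, hfind, PySem.List.pyGet?_neg_one, hx]
      exact pvLen_removeFirst cs x (List.mem_of_getLast? hx)

theorem pvLen_iterate (k : Nat) : ∀ (cs : List Char), k ≤ cs.length →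
    (pvRemoveStep^[k] cs).length = cs.length - k := by
  induction k with
  | zero => intro cs _; simp
  | succ j ih =>
    intro cs hk
    have hne : cs ≠ [] := by intro he; subst he; simp at hk
    rw [Function.iterate_succ_apply]
    have hstep := pvLen_removeStep cs hne
    rw [ih (pvRemoveStep cs) (by omega)]
    omega

theorem pvLen_skipL : ∀ (cs : List Char) (k : Nat), cs.count ',' ≤ k →
    (pvSkipL k cs).length = cs.length - cs.count ',' := by
  intro cs
  induction cs with
  | nil => intro k _; simp [pvSkipL]
  | cons c t ih =>
    intro k hk
    by_cases hc : c = ','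
    · subst hc
      rw [List.count_cons_self] at hk
      have hkpos : 0 < k := by omega
      have hih := ih (k - 1) (by omega)
      simp [pvSkipL, hkpos, hih]
      try omega
    · rw [List.count_cons_of_ne hc] at hk
      have hle := List.count_le_length (l := t) (a := ',')
      have hih := ih k hk
      simp [pvSkipL, hc, hih]
      try omega

-- ===== VERDICT (by name: the statement is the Claim_ definition above) =====
theorem create_new_string_spec : Claim_unchanged_create_new_string := by
  intro n str_ _ hpre
  unfold Spec_create_new_string
  intro hnd
  have hn : 1 ≤ n := by unfold D_create_new_string at hnd; omega
  unfold create_new_string create_new_string_alt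
  by_cases h1 : ((PySem.Chars.count str_.toList [','] : Int) + 1) < n
  · simp only [if_pos h1]
    have hL : ((PySem.Chars.count str_.toList [','] : Int) + 1)
        + (((n - ((PySem.Chars.count str_.toList [','] : Int) + 1)).toNat : Int))
        = n := by omega
    have happ := pvAppend_loop (n - ((PySem.Chars.count str_.toList [','] : Int) + 1)).toNat
      ((PySem.Chars.count str_.toList [','] : Int) + 1) str_.toList
    rw [hL] at happ
    rw [happ]
    have h2 : (((n - ((PySem.Chars.count str_.toList [','] : Int) + 1)).toNat : Int))
        = n - ((PySem.Chars.count str_.toList [','] : Int) + 1) := by omega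
    rw [h2]
  · by_cases h2 : ((PySem.Chars.count str_.toList [','] : Int) + 1) > n
    · simp only [if_neg h1, if_pos h2]
      rw [pvFoldl_ignore_iterate, pvRange_len]
      have hk : ((PySem.Chars.count str_.toList [','] : Int) + 1 - n).toNat
          ≤ str_.toList.count ',' := by
        have := pvCount str_.toList
        omega
      rw [pvIterate_eq_skipL _ _ hk]
      unfold pvSkip
      rw [pvSkip_eq_skipL]
      simp
    · simp only [if_neg h1, if_neg h2]
      rw [PySem.List.slice?_none_none_neg_one]
      rfl

theorem create_new_string_changed : Claim_changed_create_new_string := by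
  unfold Claim_changed_create_new_string; decide

theorem create_new_string_tight : Claim_exact_create_new_string := by
  intro n str_ _ hpre hD
  unfold D_create_new_string at hD
  unfold Pre_create_new_string at hpre
  have hcnt := pvCount str_.toList
  have hlen := List.count_le_length (l := str_.toList) (a := ',')
  have hn2 : ¬ ((PySem.Chars.count str_.toList [','] : Int) + 1) < n := by omega
  have hgt : ((PySem.Chars.count str_.toList [','] : Int) + 1) > n := by omega
  intro heq
  unfold create_new_string create_new_string_alt at heq
  simp only [if_neg hn2, if_pos hgt] at heq
  have h3 := congrArg (fun p : Int × String × Int => p.2.2) heq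
  simp only at h3
  rw [pvFoldl_ignore_iterate, pvRange_len] at h3
  have hB0 : pvSkip ((PySem.Chars.count str_.toList [','] : Int) + 1 - n) str_.toList
      = pvSkipL ((PySem.Chars.count str_.toList [','] : Int) + 1 - n).toNat str_.toList := by
    unfold pvSkip
    rw [pvSkip_eq_skipL]
    simp
  set k : Nat := ((PySem.Chars.count str_.toList [','] : Int) + 1 - n).toNat with hkdef
  have hkle : k ≤ str_.toList.length := by omega
  have hkgt : str_.toList.count ',' < k := by omega
  have hA : (pvRemoveStep^[k] str_.toList).length = str_.toList.length - k :=
    pvLen_iterate k str_.toList hkle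
  have hB : (pvSkipL k str_.toList).length
      = str_.toList.length - str_.toList.count ',' :=
    pvLen_skipL str_.toList k (by omega)
  rw [hB0] at h3
  have hup : ∀ l : List Char, (PySem.Chars.upper l).length = l.length := by
    intro l; simp [PySem.Chars.upper]
  have hlenA : PySem.Chars.len (PySem.Chars.upper (pvRemoveStep^[k] str_.toList))
      = ((str_.toList.length - k : Nat) : Int) := by
    simp [PySem.Chars.len_eq, hup, hA]
  have hlenB : PySem.Chars.len (PySem.Chars.upper (pvSkipL k str_.toList))
      = ((str_.toList.length - str_.toList.count ',' : Nat) : Int) := by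
    simp [PySem.Chars.len_eq, hup, hB]
  rw [hlenA, hlenB] at h3
  omega
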